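-- pv_equiv track=rewrite | github.com/Syed-Naeem-naqvi/Python_APS106 | Lab 7/lab7.py | find_unbalanced_atoms
-- ===== SOURCE A (Python) =====
-- def find_unbalanced_atoms(reactant_atoms, product_atoms):
--     """
--     (Dict,Dict) -> Set
--
--     Determine if reactant_atoms and product_atoms contain equal key-value
--     pairs. The keys of both dictionaries are strings representing the
--     chemical abbreviation, the value is an integer representing the number
--     of atoms of that element on one side of a chemical equation.
--
--     Return a set containing all the elements that are not balanced between
--     the two dictionaries.
--
--     >>> find_unbalanced_atoms({"H" : 2, "Cl" : 2, "Na" : 2}, {"H" : 2, "Na" : 1, "Cl" : 2})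
--     {'Na'}
--
--     >>> find_unbalanced_atoms({"H" : 2, "Cl" : 2, "Na" : 2}, {"H" : 2, "Na" : 2, "Cl" : 2})
--     set()
--
--     >>> find_unbalanced_atoms({"H" : 2, "Cl" : 2, "Na" : 2}, {"H" : 2, "F" : 2, "Cl" : 2})
--     {'F', 'Na'}
--     """
--
--     # TODO your code here
--
--     unbalanced = set()
--     for key, value in reactant_atoms.items():  # First check if there are any reactant atoms that aren't in products
--         if key not in product_atoms:  # Also check if the numbers are the same for the atoms that are in both reactants and products
--             unbalanced.add(key)
--         else:
--             if product_atoms[key] != value: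
--                 unbalanced.add(key)
--     for key in product_atoms:  # Now check if there are any product atoms that aren't in reactants
--         if key not in reactant_atoms:
--             unbalanced.add(key)
--
--     return unbalanced
-- ===== SOURCE B (Python) =====
-- def find_unbalanced_atoms(reactant_atoms, product_atoms):
--     # Set algebra: a key is unbalanced iff its (key, value) pair is not shared
--     # by both sides, i.e. iff it appears in the symmetric difference of the
--     # two dicts' item sets. Project that symmetric difference to its keys.
--     return {key for key, count in set(reactant_atoms.items()) ^ set(product_atoms.items())}
-- ===== Notes on version B (the rewrite author's own statement) =====
-- stated objective: simpler
-- what changed: Replaces A's two explicit membership-checking loops with set algebra: take the symmetric difference of the two dicts' (key,value) item sets and project it to keys; no per-key lookups or membership tests remain.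
import Mathlib
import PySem

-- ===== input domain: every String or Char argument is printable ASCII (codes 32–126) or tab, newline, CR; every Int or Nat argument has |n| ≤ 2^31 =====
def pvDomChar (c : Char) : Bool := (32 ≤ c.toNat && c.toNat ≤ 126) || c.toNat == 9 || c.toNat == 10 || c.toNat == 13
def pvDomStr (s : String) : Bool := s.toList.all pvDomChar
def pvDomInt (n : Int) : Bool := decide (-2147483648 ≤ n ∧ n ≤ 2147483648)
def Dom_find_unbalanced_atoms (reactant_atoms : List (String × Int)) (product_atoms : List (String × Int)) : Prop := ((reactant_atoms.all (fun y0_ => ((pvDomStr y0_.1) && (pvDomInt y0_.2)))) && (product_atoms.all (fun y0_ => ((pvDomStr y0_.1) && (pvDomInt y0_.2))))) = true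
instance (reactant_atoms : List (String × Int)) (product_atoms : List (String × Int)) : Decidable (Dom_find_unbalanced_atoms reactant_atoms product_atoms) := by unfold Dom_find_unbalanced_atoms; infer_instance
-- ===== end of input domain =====

-- B replaces A's two membership-checking loops by set algebra: the symmetric
-- difference of the two dicts' (key,value) item sets, projected to keys (objective: simpler).

-- shared dict primitive: d.get(k) as an Option (none = key absent); dict = assoc list, first match
def pyDictGet? (d : List (String × Int)) (k : String) : Option Int :=
  (d.find? (fun q => q.1 == k)).map Prod.snd

-- ===== PORT A =====
def find_unbalanced_atoms (reactant_atoms : List (String × Int)) (product_atoms : List (String × Int)) : List String :=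
  -- unbalanced = set(); for key, value in reactant_atoms.items(): …
  let unbalanced : PySem.Set String :=
    reactant_atoms.foldl (fun u kv =>
      if ¬ ((product_atoms.map Prod.fst).contains kv.1) then  -- if key not in product_atoms
        PySem.Set.add u kv.1
      else if pyDictGet? product_atoms kv.1 ≠ some kv.2 then  -- product_atoms[key] != value (key present here)
        PySem.Set.add u kv.1
      else u) PySem.Set.empty
  -- for key in product_atoms: if key not in reactant_atoms: unbalanced.add(key)
  product_atoms.foldl (fun u kv =>
    if ¬ ((reactant_atoms.map Prod.fst).contains kv.1) then PySem.Set.add u kv.1 else u) unbalanced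

-- ===== PORT B =====
def find_unbalanced_atoms_alt (reactant_atoms : List (String × Int)) (product_atoms : List (String × Int)) : List String :=
  -- {key for key, count in set(reactant_atoms.items()) ^ set(product_atoms.items())}
  -- (the comprehension over the set builds another set, so its hash order is immaterial)
  PySem.Set.ofList
    ((PySem.Set.symmDiff (PySem.Set.ofList reactant_atoms) (PySem.Set.ofList product_atoms)).map Prod.fst)

-- ===== PRECONDITION & SPEC =====
-- Pre_ restricts to association lists with pairwise-distinct keys: exactly the lists that
-- represent a Python dict (A's arguments are dicts, so duplicate keys are unreachable).
def Pre_find_unbalanced_atoms (reactant_atoms : List (String × Int)) (product_atoms : List (String × Int)) : Prop :=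
  (reactant_atoms.map Prod.fst).Nodup ∧ (product_atoms.map Prod.fst).Nodup
instance (reactant_atoms : List (String × Int)) (product_atoms : List (String × Int)) : Decidable (Pre_find_unbalanced_atoms reactant_atoms product_atoms) := by unfold Pre_find_unbalanced_atoms; infer_instance

def pvWitness_find_unbalanced_atoms : (List (String × Int)) × (List (String × Int)) :=
  ([("H", 2), ("Cl", 2), ("Na", 2)], [("H", 2), ("Na", 1), ("Cl", 2)])

def Spec_find_unbalanced_atoms (reactant_atoms : List (String × Int)) (product_atoms : List (String × Int)) (out : List String) : Prop := out = find_unbalanced_atoms_alt reactant_atoms product_atoms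
instance (reactant_atoms : List (String × Int)) (product_atoms : List (String × Int)) (out : List String) : Decidable (Spec_find_unbalanced_atoms reactant_atoms product_atoms out) := by unfold Spec_find_unbalanced_atoms; infer_instance

-- ===== CLAIM (what is proved, stated in full; the proofs are below) =====
def Claim_equal_find_unbalanced_atoms : Prop := ∀ (reactant_atoms : List (String × Int)) (product_atoms : List (String × Int)), Dom_find_unbalanced_atoms reactant_atoms product_atoms → Pre_find_unbalanced_atoms reactant_atoms product_atoms → Spec_find_unbalanced_atoms reactant_atoms product_atoms (find_unbalanced_atoms reactant_atoms product_atoms)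

-- ===== LEMMAS AND PROOFS =====

-- key membership vs lookup
theorem pyDictGet?_isSome (d : List (String × Int)) (k : String) :
    (pyDictGet? d k).isSome = (d.map Prod.fst).contains k := by
  induction d with
  | nil => rfl
  | cons kv tl ih =>
    simp only [pyDictGet?, List.find?_cons, List.map_cons, List.contains_cons]
    by_cases h : kv.1 == k
    · have hk : kv.1 = k := beq_iff_eq.mp h
      subst hk
      simp
    · have hk2 : (k == kv.1) = false :=
        beq_eq_false_iff_ne.mpr (fun e => h (beq_iff_eq.mpr e.symm))
      have hk1 : (kv.1 == k) = false := by simpa using h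
      simp only [hk1, hk2, Bool.false_or]
      simpa [pyDictGet?] using ih

theorem pyDictGet?_of_mem_nodup (d : List (String × Int)) (k : String) (v : Int)
    (hnd : (d.map Prod.fst).Nodup) (hm : (k, v) ∈ d) : pyDictGet? d k = some v := by
  induction d with
  | nil => cases hm
  | cons kv tl ih =>
    simp only [List.map_cons, List.nodup_cons] at hnd
    rcases List.mem_cons.mp hm with h | h
    · subst h; simp [pyDictGet?]
    · have hne : ¬ (kv.1 == k) := by
        intro hbeq
        exact hnd.1 (by
          have : kv.1 = k := beq_iff_eq.mp hbeq
          subst this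
          exact List.mem_map.mpr ⟨(kv.1, v), h, rfl⟩)
      simp only [pyDictGet?, List.find?_cons, hne]
      exact ih hnd.2 h

-- pair membership ↔ lookup, for a nodup-keyed dict
theorem mem_dict_iff (d : List (String × Int)) (kv : String × Int)
    (hnd : (d.map Prod.fst).Nodup) : kv ∈ d ↔ pyDictGet? d kv.1 = some kv.2 := by
  constructor
  · intro hm
    exact pyDictGet?_of_mem_nodup d kv.1 kv.2 hnd (by simpa using hm)
  · intro hg
    unfold pyDictGet? at hg
    rcases hfind : d.find? (fun q => q.1 == kv.1) with _ | q
    · rw [hfind] at hg; cases hg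
    · rw [hfind] at hg
      have hb := List.find?_some hfind
      have hq1 : q.1 = kv.1 := by simpa using hb
      have hq2 : q.2 = kv.2 := by simpa using hg
      have : q = kv := Prod.ext hq1 hq2
      exact this ▸ List.mem_of_find?_eq_some hfind

-- the "add if fresh" loop appends the filtered keys
theorem foldl_add_if (l : List (String × Int)) (cond : String × Int → Bool) (acc : List String)
    (hnd : (l.map Prod.fst).Nodup) (hfresh : ∀ kv ∈ l, cond kv → kv.1 ∉ acc) :
    l.foldl (fun u kv => if cond kv then PySem.Set.add u kv.1 else u) acc
      = acc ++ (l.filter cond).map Prod.fst := by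
  induction l generalizing acc with
  | nil => simp
  | cons kv tl ih =>
    simp only [List.map_cons, List.nodup_cons] at hnd
    simp only [List.foldl_cons, List.filter_cons]
    by_cases hc : cond kv
    · rw [if_pos hc, PySem.Set.add_of_not_mem (hfresh kv (List.mem_cons_self) hc)]
      rw [ih _ hnd.2 ?_]
      · simp [hc]
      · intro kv' hkv' hc' hmem
        rcases List.mem_append.mp hmem with h | h
        · exact hfresh kv' (List.mem_cons_of_mem _ hkv') hc' h
        · exact hnd.1 (by
            have : kv'.1 = kv.1 := by simpa using h
            rw [← this]; exact List.mem_map.mpr ⟨kv', hkv', rfl⟩)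
    · rw [if_neg hc, ih _ hnd.2 (fun kv' h hc' => hfresh kv' (List.mem_cons_of_mem _ h) hc')]
      simp [hc]

theorem pyDictGet?_eq_none_of_not_contains (d : List (String × Int)) (k : String)
    (h : (d.map Prod.fst).contains k = false) : pyDictGet? d k = none := by
  have := pyDictGet?_isSome d k
  rw [h] at this
  exact Option.not_isSome_iff_eq_none.mp (by simp [this])

theorem find_unbalanced_atoms_spec : Claim_equal_find_unbalanced_atoms := by
  intro r p _hdom hpre
  obtain ⟨hr, hp⟩ := hpre
  have hnr : r.Nodup := List.Nodup.of_map Prod.fst hr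
  have hnp : p.Nodup := List.Nodup.of_map Prod.fst hp
  unfold Spec_find_unbalanced_atoms find_unbalanced_atoms find_unbalanced_atoms_alt
  set rk := r.map Prod.fst with hrk
  set pk := p.map Prod.fst with hpk
  set condA : String × Int → Bool :=
    fun kv => !(pk.contains kv.1) || decide (pyDictGet? p kv.1 ≠ some kv.2) with hcondA
  set condB : String × Int → Bool := fun kv => !(rk.contains kv.1) with hcondB
  -- A's two loops are "add if fresh" folds producing X ++ Y
  have hfun1 : (fun (u : PySem.Set String) (kv : String × Int) =>
      if ¬ (pk.contains kv.1) then PySem.Set.add u kv.1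
      else if pyDictGet? p kv.1 ≠ some kv.2 then PySem.Set.add u kv.1 else u)
      = (fun u kv => if condA kv then PySem.Set.add u kv.1 else u) := by
    funext u kv
    simp only [hcondA]
    split_ifs with h1 h2 h3 h3 <;> simp_all
  have hfun2 : (fun (u : PySem.Set String) (kv : String × Int) =>
      if ¬ (rk.contains kv.1) then PySem.Set.add u kv.1 else u)
      = (fun u kv => if condB kv then PySem.Set.add u kv.1 else u) := by
    funext u kv
    simp only [hcondB]
    split_ifs with h1 h2 h2 <;> simp_all
  rw [hfun1, hfun2]
  rw [foldl_add_if r condA PySem.Set.empty hr (by intro kv _ _ h; cases h)]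
  have hfresh2 : ∀ kv ∈ p, condB kv = true →
      kv.1 ∉ (PySem.Set.empty ++ (r.filter condA).map Prod.fst : List String) := by
    intro kv hkv hc hmem
    simp only [PySem.Set.empty, List.nil_append] at hmem
    have : kv.1 ∈ rk := by
      rcases List.mem_map.mp hmem with ⟨kv', hkv', he⟩
      exact he ▸ List.mem_map.mpr ⟨kv', List.mem_of_mem_filter hkv', rfl⟩
    simp only [hcondB] at hc
    simp [this] at hc
  rw [foldl_add_if p condB _ hp hfresh2]
  simp only [PySem.Set.empty, List.nil_append]
  -- B's side: unfold the symmetric difference of the two item sets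
  rw [PySem.Set.ofList_eq_self_of_nodup r hnr, PySem.Set.ofList_eq_self_of_nodup p hnp]
  simp only [PySem.Set.symmDiff, PySem.Set.diff, List.map_append]
  -- first segment: pairs of r not shared with p = r's mismatched keys (condA)
  have hpiece1 : r.filter (fun x => !(PySem.Set.contains p x)) = r.filter condA := by
    apply List.filter_congr
    intro kv _
    have hmp : kv ∈ p ↔ pyDictGet? p kv.1 = some kv.2 := mem_dict_iff p kv hp
    cases hpc : pk.contains kv.1
    · have hnone : pyDictGet? p kv.1 = none := pyDictGet?_eq_none_of_not_contains p kv.1 hpc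
      have hnm : kv ∉ p := fun h => by rw [hmp] at h; rw [hnone] at h; cases h
      simp [hcondA, hnm, hnone]
    · have hkpk : kv.1 ∈ pk := by simpa using hpc
      have hsome : (pyDictGet? p kv.1).isSome := by rw [pyDictGet?_isSome]; exact hpc
      rcases Option.isSome_iff_exists.mp hsome with ⟨w, hw⟩
      by_cases he : w = kv.2
      · subst he
        have hm : kv ∈ p := hmp.mpr hw
        simp [hcondA, hm, hw, hkpk]
      · have hnm : kv ∉ p := fun h => he (by
          rw [hmp] at h; rw [hw] at h; exact Option.some.inj h)
        have hne : pyDictGet? p kv.1 ≠ some kv.2 := by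
          rw [hw]; exact fun h => he (Option.some.inj h)
        simp [hcondA, hnm, hne, hkpk]
  rw [hpiece1, PySem.Set.ofList_append]
  have hXnd : ((r.filter condA).map Prod.fst).Nodup :=
    (List.Sublist.map Prod.fst List.filter_sublist).nodup hr
  rw [PySem.Set.ofList_eq_self_of_nodup _ hXnd, PySem.Set.update_eq_append_filter]
  have hYnd : ((p.filter (fun x => !(PySem.Set.contains r x))).map Prod.fst).Nodup :=
    (List.Sublist.map Prod.fst List.filter_sublist).nodup hp
  rw [PySem.Set.ofList_eq_self_of_nodup _ hYnd]
  congr 1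
  -- second segment: keys of p-pairs not shared with r, minus keys already emitted = condB keys
  rw [List.filter_map, List.filter_filter]
  apply congrArg (List.map Prod.fst)
  apply List.filter_congr
  intro kv hkv
  have hgp : pyDictGet? p kv.1 = some kv.2 := (mem_dict_iff p kv hp).mp hkv
  have hXsub : ∀ y, y ∈ (r.filter condA).map Prod.fst → y ∈ rk := by
    intro y hy
    rcases List.mem_map.mp hy with ⟨kv', hkv', he⟩
    exact he ▸ List.mem_map.mpr ⟨kv', List.mem_of_mem_filter hkv', rfl⟩
  by_cases hk : kv.1 ∈ rk
  · -- key present in r: condB false, and the pair-filter side is false too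
    have hkc : rk.contains kv.1 = true := by simpa using hk
    have hsome : (pyDictGet? r kv.1).isSome := by rw [pyDictGet?_isSome]; exact hkc
    rcases Option.isSome_iff_exists.mp hsome with ⟨w, hw⟩
    by_cases he : w = kv.2
    · -- balanced pair: kv ∈ r
      have hm : kv ∈ r := (mem_dict_iff r kv hr).mpr (he ▸ hw)
      simp [hcondB, hm, hk]
    · -- mismatched: kv.1 already in the first segment
      have hmr : (kv.1, w) ∈ r := (mem_dict_iff r (kv.1, w) hr).mpr hw
      have hcA : condA (kv.1, w) = true := by
        have hne : pyDictGet? p kv.1 ≠ some w := by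
          rw [hgp]; exact fun h => he (Option.some.inj h).symm
        simp [hcondA, hne]
      have hX : kv.1 ∈ (r.filter condA).map Prod.fst :=
        List.mem_map.mpr ⟨(kv.1, w), List.mem_filter.mpr ⟨hmr, hcA⟩, rfl⟩
      simp [hcondB, hX, hk]
  · -- key absent from r: condB true, pair not in r, key not in first segment
    have hkc : rk.contains kv.1 = false := by simpa using hk
    have hnm : kv ∉ r := fun h => hk (List.mem_map.mpr ⟨kv, h, rfl⟩)
    have hnX : kv.1 ∉ (r.filter condA).map Prod.fst := fun h => hk (hXsub kv.1 h)
    simp [hcondB, hnm, hnX, hk]
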